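-- pv_equiv track=rewrite | github.com/shiyuqin00-coder/Qdestiny | core/scheduler.py | _check_labels_match
-- ===== SOURCE A (Python) =====
-- from typing import Dict, Any, List, Optional, Tuple
--
-- def _check_labels_match(node_labels: Dict[str, str],
--                       required_labels: Dict[str, str]) -> bool:
--     """检查节点标签是否匹配服务要求"""
--     if not required_labels:
--         return True
--
--     for key, value in required_labels.items():
--         if key not in node_labels or node_labels[key] != value:
--             return False
--
--     return True
-- ===== SOURCE B (Python) =====
-- def _check_labels_match(node_labels, required_labels):
--     """检查节点标签是否匹配服务要求"""
--     merged = {**node_labels, **required_labels}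
--     return merged == node_labels
-- ===== Notes on version B (the rewrite author's own statement) =====
-- stated objective: alternative
-- what changed: Instead of iterating over the required pairs with lookups and early returns, B builds the overlay dict {**node_labels, **required_labels} and returns whether the merge left node_labels unchanged (dict equality); labels match exactly when overlaying the requirements is a no-op. (Lean Pre_ only excludes duplicate-key association lists, which do not represent any Python dict.)
import Mathlib
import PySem

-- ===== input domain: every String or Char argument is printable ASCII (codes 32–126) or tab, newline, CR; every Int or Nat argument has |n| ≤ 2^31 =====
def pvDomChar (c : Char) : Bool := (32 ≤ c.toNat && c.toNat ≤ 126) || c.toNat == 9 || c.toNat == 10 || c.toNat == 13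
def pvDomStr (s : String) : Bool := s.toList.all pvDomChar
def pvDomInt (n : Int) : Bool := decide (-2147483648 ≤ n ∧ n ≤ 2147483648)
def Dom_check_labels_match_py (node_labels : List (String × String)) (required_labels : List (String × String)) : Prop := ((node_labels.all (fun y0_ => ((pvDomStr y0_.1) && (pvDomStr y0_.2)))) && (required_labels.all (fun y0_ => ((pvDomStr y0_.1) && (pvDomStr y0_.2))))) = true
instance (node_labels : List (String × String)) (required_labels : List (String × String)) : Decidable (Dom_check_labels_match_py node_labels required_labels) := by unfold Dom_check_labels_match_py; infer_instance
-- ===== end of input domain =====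

-- B replaces A's per-pair loop with early returns by a dict overlay: merge required into node
-- and check the merge changed nothing (alternative algorithm; same cost).


-- ===== PORT A =====
-- Python dict lookup on the association list: first match (exact for dicts, which have unique keys).
def pvDictGet? (d : List (String × String)) (k : String) : Option String :=
  match d with
  | [] => none
  | (k', v) :: rest => if k' == k then some v else pvDictGet? rest k

-- the `for key, value in required_labels.items()` loop with its early `return False`
def pvCheckLoopA (node_labels : List (String × String)) : List (String × String) → Bool
  | [] => true
  | (key, value) :: rest =>
      if (pvDictGet? node_labels key).isNone || pvDictGet? node_labels key != some value then
        false
      else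
        pvCheckLoopA node_labels rest

def check_labels_match_py (node_labels : List (String × String)) (required_labels : List (String × String)) : Bool :=
  if required_labels.isEmpty then true
  else pvCheckLoopA node_labels required_labels

-- ===== PORT B =====
-- merged = {**node_labels, **required_labels}; return merged == node_labels
-- (Python's dict == ignores insertion order: same size and same value at every key)
def check_labels_match_py_alt (node_labels : List (String × String)) (required_labels : List (String × String)) : Bool :=
  let nd : PySem.Dict String String := PySem.Dict.ofList node_labels
  let merged : PySem.Dict String String := nd.update required_labels
  (merged.size == nd.size) && nd.items.all (fun kv => merged.get? kv.1 == some kv.2)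

-- ===== PRECONDITION & SPEC =====
-- Pre_ excludes only association lists whose keys repeat: such lists do not encode any Python
-- dict (dict keys are unique), so no Python input is excluded.
def Pre_check_labels_match_py (node_labels : List (String × String)) (required_labels : List (String × String)) : Prop :=
  (node_labels.map Prod.fst).Nodup ∧ (required_labels.map Prod.fst).Nodup
instance (node_labels : List (String × String)) (required_labels : List (String × String)) : Decidable (Pre_check_labels_match_py node_labels required_labels) := by unfold Pre_check_labels_match_py; infer_instance

def pvWitness_check_labels_match_py : (List (String × String)) × (List (String × String)) :=
  ([("a", "1"), ("b", "2")], [("a", "1")])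

def Spec_check_labels_match_py (node_labels : List (String × String)) (required_labels : List (String × String)) (out : Bool) : Prop := out = check_labels_match_py_alt node_labels required_labels
instance (node_labels : List (String × String)) (required_labels : List (String × String)) (out : Bool) : Decidable (Spec_check_labels_match_py node_labels required_labels out) := by unfold Spec_check_labels_match_py; infer_instance

-- ===== CLAIM (what is proved, stated in full; the proofs are below) =====
def Claim_equal_check_labels_match_py : Prop := ∀ (node_labels : List (String × String)) (required_labels : List (String × String)), Dom_check_labels_match_py node_labels required_labels → Pre_check_labels_match_py node_labels required_labels → Spec_check_labels_match_py node_labels required_labels (check_labels_match_py node_labels required_labels)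

-- ===== LEMMAS AND PROOFS =====

theorem pvDictGet?_eq_none_iff (l : List (String × String)) (k : String) :
    pvDictGet? l k = none ↔ k ∉ l.map Prod.fst := by
  induction l with
  | nil => simp [pvDictGet?]
  | cons hd tl ih =>
      obtain ⟨k', v⟩ := hd
      by_cases h : k' = k
      · subst h; simp [pvDictGet?]
      · simp [pvDictGet?, h, ih, Ne.symm h]

-- With nodup keys, first-match lookup returning (some v) is exactly pair membership.
theorem pvDictGet?_eq_some_iff (nl : List (String × String))
    (h : (nl.map Prod.fst).Nodup) (k v : String) :
    pvDictGet? nl k = some v ↔ (k, v) ∈ nl := by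
  induction nl with
  | nil => simp [pvDictGet?]
  | cons hd tl ih =>
      obtain ⟨k', v'⟩ := hd
      simp only [List.map_cons, List.nodup_cons] at h
      obtain ⟨hk', htl⟩ := h
      by_cases hkk : k' = k
      · subst hkk
        simp only [pvDictGet?, beq_self_eq_true, if_true, List.mem_cons]
        constructor
        · rintro h'; exact Or.inl (by cases h'; rfl)
        · rintro (h' | h')
          · cases h'; rfl
          · exact absurd (List.mem_map.mpr ⟨(k', v), h', rfl⟩) hk'
      · simp only [pvDictGet?, beq_iff_eq, hkk, if_false, List.mem_cons, ih htl]
        constructor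
        · exact Or.inr
        · rintro (h' | h')
          · exact absurd (congrArg Prod.fst h').symm hkk
          · exact h'

-- A's loop is the conjunction over required pairs of "lookup equals the required value".
theorem pvCheckLoopA_eq_all (nl rl : List (String × String)) :
    pvCheckLoopA nl rl = rl.all (fun kv => pvDictGet? nl kv.1 == some kv.2) := by
  induction rl with
  | nil => rfl
  | cons hd tl ih =>
      obtain ⟨k, v⟩ := hd
      simp only [pvCheckLoopA, List.all_cons, ← ih]
      cases hopt : pvDictGet? nl k with
      | none => simp
      | some w =>
          by_cases hwv : w = v
          · subst hwv; simp
          · simp [hwv]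

-- Dict.get? on a literal items list is first-match lookup.
theorem mk_get?_eq_pvDictGet? (l : List (String × String)) (k : String) :
    (PySem.Dict.mk l).get? k = pvDictGet? l k := by
  induction l with
  | nil => rfl
  | cons hd tl ih =>
      obtain ⟨k', v⟩ := hd
      by_cases h : k' = k
      · subst h; simp [PySem.Dict.get?, pvDictGet?, List.find?]
      · have hb : (k' == k) = false := beq_eq_false_iff_ne.mpr h
        simp only [pvDictGet?, hb, ← ih]
        simp [PySem.Dict.get?, List.find?, hb]

-- Building a dict from a nodup-keyed association list keeps exactly that list as items.
theorem ofList_items_of_nodup (l : List (String × String))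
    (h : (l.map Prod.fst).Nodup) :
    (PySem.Dict.ofList l).items = l := by
  have := PySem.Dict.items_foldl_insert_fresh (l := l) (k := Prod.fst) (v := Prod.snd)
    (d := (PySem.Dict.empty : PySem.Dict String String))
    (by intro a _; rfl) h
  simpa [PySem.Dict.ofList, PySem.Dict.update] using this

-- In a nodup-keyed items list, a key determines its pair.
theorem pair_eq_of_key_eq {l : List (String × String)} (h : (l.map Prod.fst).Nodup)
    {p q : String × String} (hp : p ∈ l) (hq : q ∈ l) (hk : p.1 = q.1) : p = q := by
  induction l with
  | nil => cases hp
  | cons hd tl ih =>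
      simp only [List.map_cons, List.nodup_cons] at h
      obtain ⟨hhd, htl⟩ := h
      rcases List.mem_cons.mp hp with hp1 | hp1
      · rcases List.mem_cons.mp hq with hq1 | hq1
        · rw [hp1, hq1]
        · exfalso; apply hhd; rw [← hp1, hk]; exact List.mem_map.mpr ⟨q, hq1, rfl⟩
      · rcases List.mem_cons.mp hq with hq1 | hq1
        · exfalso; apply hhd; rw [← hq1, ← hk]; exact List.mem_map.mpr ⟨p, hp1, rfl⟩
        · exact ih htl hp1 hq1

-- Inserting a pair the dict already holds is a no-op.
theorem insert_id (d : PySem.Dict String String) (k v : String)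
    (hnd : d.keys.Nodup) (hget : d.get? k = some v) : d.insert k v = d := by
  have hmem : (k, v) ∈ d.items := (PySem.Dict.get?_eq_some_iff_mem_items d k v hnd).mp hget
  have hc : d.contains k = true := by
    rw [PySem.Dict.contains_iff_mem_keys]
    exact List.mem_map.mpr ⟨(k, v), hmem, rfl⟩
  apply PySem.Dict.ext
  rw [PySem.Dict.items_insert_of_contains d v hc]
  have hmap : ∀ p ∈ d.items, (if (p.1 == k) = true then (k, v) else p) = id p := by
    intro p hp
    by_cases hpk : p.1 = k
    · have : p = (k, v) := pair_eq_of_key_eq hnd hp hmem hpk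
      simp [this]
    · simp [hpk]
  calc List.map (fun p => if (p.1 == k) = true then (k, v) else p) d.items
      = List.map id d.items := List.map_congr_left hmap
    _ = d.items := List.map_id d.items

-- Lookup in the merged dict: required pairs win, otherwise the node value survives.
theorem update_get? (rl : List (String × String)) :
    ∀ (d : PySem.Dict String String) (j : String), (rl.map Prod.fst).Nodup →
      (d.update rl).get? j =
        (match pvDictGet? rl j with | some v => some v | none => d.get? j) := by
  induction rl with
  | nil => intro d j _; rfl
  | cons hd tl ih =>
      intro d j h
      obtain ⟨k, v⟩ := hd
      simp only [List.map_cons, List.nodup_cons] at h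
      obtain ⟨hk, htl⟩ := h
      have : (d.update ((k, v) :: tl)) = ((d.insert k v).update tl) := rfl
      rw [this, ih (d.insert k v) j htl]
      by_cases hjk : j = k
      · subst hjk
        have hnone : pvDictGet? tl j = none :=
          (pvDictGet?_eq_none_iff tl j).mpr hk
        simp [pvDictGet?, hnone, PySem.Dict.get?_insert_self]
      · have hkj : ¬ (k = j) := fun h' => hjk h'.symm
        simp only [pvDictGet?, beq_iff_eq, hkj, if_false]
        cases pvDictGet? tl j with
        | some w => rfl
        | none =>
            rw [PySem.Dict.get?_insert d k j v]
            simp [hjk]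

-- If every required pair is already in the dict, the whole merge is a no-op.
theorem update_id (rl : List (String × String)) (d : PySem.Dict String String)
    (hnd : d.keys.Nodup)
    (hall : ∀ kv ∈ rl, d.get? kv.1 = some kv.2) : d.update rl = d := by
  induction rl with
  | nil => rfl
  | cons hd tl ih =>
      obtain ⟨k, v⟩ := hd
      have h1 : d.insert k v = d := insert_id d k v hnd (hall (k, v) (List.mem_cons_self))
      have : (d.update ((k, v) :: tl)) = ((d.insert k v).update tl) := rfl
      rw [this, h1]
      exact ih (fun kv hkv => hall kv (List.mem_cons_of_mem _ hkv))

-- ===== VERDICT (by name: the statement is the Claim_ definition above) =====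
theorem check_labels_match_py_spec : Claim_equal_check_labels_match_py := by
  intro nl rl _ hpre
  obtain ⟨hnl, hrl⟩ := hpre
  unfold Spec_check_labels_match_py check_labels_match_py check_labels_match_py_alt
  show (if rl.isEmpty then true else pvCheckLoopA nl rl)
      = ((((PySem.Dict.ofList nl).update rl).size == (PySem.Dict.ofList nl).size)
          && (PySem.Dict.ofList nl).items.all
              (fun kv => ((PySem.Dict.ofList nl).update rl).get? kv.1 == some kv.2))
  set nd : PySem.Dict String String := PySem.Dict.ofList nl with hnd_def
  have hitems : nd.items = nl := ofList_items_of_nodup nl hnl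
  have hkeys : nd.keys = nl.map Prod.fst := by rw [PySem.Dict.keys, hitems]
  have hknd : nd.keys.Nodup := by rw [hkeys]; exact hnl
  have hget : ∀ k, nd.get? k = pvDictGet? nl k := by
    intro k
    have : nd = PySem.Dict.mk nl := PySem.Dict.ext hitems
    rw [this, mk_get?_eq_pvDictGet?]
  -- reduce A's side to the `all` form (empty case included)
  have hA : (if rl.isEmpty then true else pvCheckLoopA nl rl)
      = rl.all (fun kv => pvDictGet? nl kv.1 == some kv.2) := by
    cases rl with
    | nil => rfl
    | cons hd tl =>
        simp only [List.isEmpty_cons, if_neg Bool.false_ne_true]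
        exact pvCheckLoopA_eq_all nl (hd :: tl)
  rw [hA]
  -- now prove  all = merged-comparison, by cases on the `all`
  cases hall : rl.all (fun kv => pvDictGet? nl kv.1 == some kv.2) with
  | true =>
      have hmerge : nd.update rl = nd := by
        apply update_id rl nd hknd
        intro kv hkv
        have := List.all_eq_true.mp hall kv hkv
        rw [hget]
        exact eq_of_beq this
      rw [hmerge]
      simp only [beq_self_eq_true, Bool.true_and]
      symm
      apply List.all_eq_true.mpr
      intro kv hkv
      have : nd.get? kv.1 = some kv.2 :=
        PySem.Dict.get?_of_mem_items nd (by simpa using hkv) hknd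
      simp [this]
  | false =>
      obtain ⟨kv, hkvmem, hkvbad⟩ := by
        have := List.all_eq_false.mp hall
        exact this
      obtain ⟨k, v⟩ := kv
      simp only [beq_iff_eq] at hkvbad
      replace hkvbad : pvDictGet? nl k ≠ some v := by simpa using hkvbad
      symm
      cases hopt : pvDictGet? nl k with
      | none =>
          -- k is a new key: the merged dict is strictly larger
          have hkout : k ∉ nl.map Prod.fst := (pvDictGet?_eq_none_iff nl k).mp hopt
          have hmk : (nd.update rl).keys = PySem.Set.update nd.keys (rl.map Prod.fst) := by
            have := PySem.Dict.keys_foldl_insert_key (l := rl) (key := Prod.fst)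
              (f := fun _ kv => kv.2) (d := nd)
            simpa [PySem.Dict.update] using this
          have hmnd : (nd.update rl).keys.Nodup := by
            have := PySem.Dict.nodup_keys_foldl_insert_key (l := rl) (key := Prod.fst)
              (f := fun _ kv => kv.2) (d := nd) hknd
            simpa [PySem.Dict.update] using this
          have hsub : (k :: nd.keys) ⊆ (nd.update rl).keys := by
            intro x hx
            rw [hmk]
            rcases List.mem_cons.mp hx with hx | hx
            · subst hx
              exact (PySem.Set.mem_update nd.keys (rl.map Prod.fst) x).mpr
                (Or.inr (List.mem_map.mpr ⟨(x, v), hkvmem, rfl⟩))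
            · exact (PySem.Set.mem_update nd.keys (rl.map Prod.fst) x).mpr (Or.inl hx)
          have hsnd : (k :: nd.keys).Nodup := by
            rw [hkeys]; exact List.nodup_cons.mpr ⟨hkout, hnl⟩
          have hlen : nd.keys.length + 1 ≤ (nd.update rl).keys.length := by
            have h1 : (k :: nd.keys).toFinset.card ≤ (nd.update rl).keys.toFinset.card :=
              Finset.card_le_card (fun x hx =>
                List.mem_toFinset.mpr (hsub (List.mem_toFinset.mp hx)))
            rw [List.toFinset_card_of_nodup hsnd, List.toFinset_card_of_nodup hmnd] at h1
            simpa using h1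
          have hsize : (nd.update rl).size ≠ nd.size := by
            have e1 : (nd.update rl).size = (nd.update rl).keys.length := by
              simp [PySem.Dict.size, PySem.Dict.keys]
            have e2 : nd.size = nd.keys.length := by
              simp [PySem.Dict.size, PySem.Dict.keys]
            omega
          simp [hsize]
      | some w =>
          -- key present with the wrong value: the comparison fails at (k, w)
          have hwv : w ≠ v := fun h' => hkvbad (by rw [hopt, h'])
          have hwmem : (k, w) ∈ nd.items := by
            rw [hitems]; exact (pvDictGet?_eq_some_iff nl hnl k w).mp hopt
          have hreq : pvDictGet? rl k = some v := (pvDictGet?_eq_some_iff rl hrl k v).mpr hkvmem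
          have hmget : (nd.update rl).get? k = some v := by
            rw [update_get? rl nd k hrl, hreq]
          apply Bool.and_eq_false_iff.mpr
          right
          apply List.all_eq_false.mpr
          exact ⟨(k, w), hwmem, by simp [hmget]; exact fun h' => hwv h'.symm⟩
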